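-- pv_equiv track=rewrite | github.com/dominiquegarmier/AnIdea | anidea/tools/FPOs.py | paramf
-- ===== SOURCE A (Python) =====
-- def matmulf(n,m,k, isparallel):
--     if isparallel:
--         return 2*m-1
--     else:
--         return (2*m-1)*n*k
--
-- def vecaddf(n, isparallel):
--     if isparallel:
--         return 1
--     else:
--         return n
--
-- def actfunc(n, afunc, isparallel):
--     if isparallel:
--         return afunc
--     else:
--         return n*afunc
--
-- def layerf(n, m, afunc, isparallel):
-- 	# weight matrix: m times n
-- 	# (m, n)*(n, 1)
--
-- 	flops = 0
--
-- 	flops += matmulf(n, m, 1, isparallel)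
-- 	flops += vecaddf(m, isparallel)
-- 	flops += actfunc(m, afunc, isparallel)
--
-- 	return flops
--
-- def paramf(n, nnarc, afunc, isparallel):
--
--     flops = 0
--     prevlayer = 2
--     for width in nnarc:
--
--         flops += layerf(prevlayer, n*width, afunc, isparallel)
--         prevlayer = n*width
--
--     flops += layerf(prevlayer, n, afunc, isparallel)
--
--     return flops
-- ===== SOURCE B (Python) =====
-- def paramf(n, nnarc, afunc, isparallel):
--     # Closed-form aggregate computation: instead of walking layers with a
--     # prevlayer accumulator, compute scalar aggregates of nnarc and combine
--     # them algebraically (n is factored out of the coupled matmul term).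
--     k = len(nnarc)
--     S = sum(nnarc)
--     tail = n * S + n                # total width of all non-input layers
--     if isparallel:
--         return 2 * tail + (k + 1) * afunc
--     if k == 0:
--         P = 2 * n                   # single 2 -> n layer
--     else:
--         adj = sum(a * b for a, b in zip(nnarc, nnarc[1:]))
--         P = 2 * n * nnarc[0] + n * n * (adj + nnarc[-1])
--     return 2 * P - (2 + n * S) + (1 + afunc) * tail
-- ===== Notes on version B (the rewrite author's own statement) =====
-- stated objective: simpler
-- what changed: Eliminates A's layer-by-layer walk with a prevlayer accumulator and per-layer helper functions: B computes scalar aggregates of nnarc (length, sum, adjacent-product sum via builtin sum) and combines them in one derived algebraic formula, fully closed-form in the parallel case.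
import Mathlib
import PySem

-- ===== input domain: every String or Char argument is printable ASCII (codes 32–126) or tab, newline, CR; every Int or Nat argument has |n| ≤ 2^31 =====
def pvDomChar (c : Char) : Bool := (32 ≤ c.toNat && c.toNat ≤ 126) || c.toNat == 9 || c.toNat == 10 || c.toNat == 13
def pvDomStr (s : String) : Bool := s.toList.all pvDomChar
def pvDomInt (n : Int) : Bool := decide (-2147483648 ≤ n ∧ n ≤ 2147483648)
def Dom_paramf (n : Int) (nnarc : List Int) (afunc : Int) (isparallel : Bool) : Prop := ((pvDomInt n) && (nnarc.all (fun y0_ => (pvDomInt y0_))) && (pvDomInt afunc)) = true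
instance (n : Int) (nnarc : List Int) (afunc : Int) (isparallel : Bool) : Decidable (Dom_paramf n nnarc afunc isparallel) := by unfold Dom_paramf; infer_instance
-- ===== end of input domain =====

-- B replaces A's layer-by-layer accumulator walk with scalar aggregates of nnarc
-- combined in one derived algebraic formula; objective: simpler.

-- ===== PORT A =====
def matmulf (n m k : Int) (isparallel : Bool) : Int :=
  if isparallel then 2*m - 1 else (2*m - 1) * n * k

def vecaddf (n : Int) (isparallel : Bool) : Int :=
  if isparallel then 1 else n

def actfunc (n afunc : Int) (isparallel : Bool) : Int :=
  if isparallel then afunc else n * afunc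

def layerf (n m afunc : Int) (isparallel : Bool) : Int :=
  0 + matmulf n m 1 isparallel + vecaddf m isparallel + actfunc m afunc isparallel

def paramf (n : Int) (nnarc : List Int) (afunc : Int) (isparallel : Bool) : Int :=
  let s := nnarc.foldl
    (fun (st : Int × Int) width =>
      (st.1 + layerf st.2 (n * width) afunc isparallel, n * width))
    (0, 2)
  s.1 + layerf s.2 n afunc isparallel

-- ===== PORT B =====
def paramf_alt (n : Int) (nnarc : List Int) (afunc : Int) (isparallel : Bool) : Int :=
  let k : Int := (nnarc.length : Int)
  let S : Int := nnarc.sum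
  let tail : Int := n * S + n
  if isparallel then
    2 * tail + (k + 1) * afunc
  else
    let P : Int :=
      if k = 0 then 2 * n
      else
        let adj : Int := ((nnarc.zip (nnarc.drop 1)).map (fun p => p.1 * p.2)).sum
        2 * n * nnarc.headI + n * n * (adj + nnarc.getLastD 0)
    2 * P - (2 + n * S) + (1 + afunc) * tail

-- ===== PRECONDITION & SPEC =====
def Spec_paramf (n : Int) (nnarc : List Int) (afunc : Int) (isparallel : Bool) (out : Int) : Prop := out = paramf_alt n nnarc afunc isparallel
instance (n : Int) (nnarc : List Int) (afunc : Int) (isparallel : Bool) (out : Int) : Decidable (Spec_paramf n nnarc afunc isparallel out) := by unfold Spec_paramf; infer_instance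

-- ===== CLAIM (what is proved, stated in full; the proofs are below) =====
def Claim_equal_paramf : Prop := ∀ (n : Int) (nnarc : List Int) (afunc : Int) (isparallel : Bool), Dom_paramf n nnarc afunc isparallel → Spec_paramf n nnarc afunc isparallel (paramf n nnarc afunc isparallel)

-- ===== LEMMAS AND PROOFS =====

/-- Sum of A's per-layer cost over consecutive pairs of a dimension chain. -/
def chain (afunc : Int) (isparallel : Bool) : List Int → Int
  | a :: b :: rest => layerf a b afunc isparallel + chain afunc isparallel (b :: rest)
  | _ => 0

/-- Sum of products of consecutive elements. -/
def pairsum : List Int → Int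
  | a :: b :: rest => a * b + pairsum (b :: rest)
  | _ => 0

/-- Sum of all elements except the last. -/
def butlastsum : List Int → Int
  | a :: b :: rest => a + butlastsum (b :: rest)
  | _ => 0

theorem loopA (n afunc : Int) (isparallel : Bool) :
    ∀ (ws : List Int) (acc prev : Int),
      (let s := ws.foldl
        (fun (st : Int × Int) width =>
          (st.1 + layerf st.2 (n * width) afunc isparallel, n * width))
        (acc, prev)
       s.1 + layerf s.2 n afunc isparallel)
      = acc + chain afunc isparallel (prev :: ws.map (fun w => n * w) ++ [n]) := by
  intro ws
  induction ws with
  | nil => intro acc prev; simp [chain]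
  | cons w ws ih =>
      intro acc prev
      simp only [List.foldl_cons, List.map_cons, List.cons_append]
      rw [ih]
      show acc + layerf prev (n * w) afunc isparallel + _ = _
      rw [chain, List.cons_append]
      ring

theorem chain_par (afunc : Int) :
    ∀ (ds : List Int) (a : Int),
      chain afunc true (a :: ds) = 2 * ds.sum + (ds.length : Int) * afunc := by
  intro ds
  induction ds with
  | nil => intro a; simp [chain]
  | cons b ds ih =>
      intro a
      rw [chain, ih]
      simp [layerf, matmulf, vecaddf, actfunc]
      ring

theorem chain_seq (afunc : Int) :
    ∀ (ds : List Int) (a : Int),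
      chain afunc false (a :: ds)
        = 2 * pairsum (a :: ds) - butlastsum (a :: ds) + (1 + afunc) * ds.sum := by
  intro ds
  induction ds with
  | nil => intro a; simp [chain, pairsum, butlastsum]
  | cons b ds ih =>
      intro a
      rw [chain, ih, pairsum, butlastsum]
      simp [layerf, matmulf, vecaddf, actfunc]
      ring

theorem sum_map_mul (n : Int) : ∀ (l : List Int), (l.map (fun w => n * w)).sum = n * l.sum := by
  intro l
  induction l with
  | nil => simp
  | cons a l ih => simp [ih]; ring

theorem butlastsum_append_last (c : Int) :
    ∀ (xs : List Int), butlastsum (xs ++ [c]) = xs.sum := by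
  intro xs
  induction xs with
  | nil => simp [butlastsum]
  | cons a xs ih =>
      cases xs with
      | nil => simp [butlastsum]
      | cons b r =>
          show a + butlastsum ((b :: r) ++ [c]) = _
          rw [ih]; simp

theorem pairsum_map_last (n : Int) :
    ∀ (ws : List Int) (w : Int),
      pairsum ((n * w) :: (ws.map (fun x => n * x) ++ [n]))
        = n * n * (((w :: ws).zip ws).map (fun p => p.1 * p.2)).sum
          + n * n * (w :: ws).getLastD 0 := by
  intro ws
  induction ws with
  | nil => intro w; simp [pairsum]; ring
  | cons x r ih =>
      intro w
      simp only [List.map_cons, List.cons_append]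
      rw [pairsum, ih x]
      simp [List.zip_cons_cons]
      ring

-- ===== VERDICT (by name: the statement is the Claim_ definition above) =====
theorem paramf_spec : Claim_equal_paramf := by
  intro n nnarc afunc isparallel _
  show paramf n nnarc afunc isparallel = paramf_alt n nnarc afunc isparallel
  unfold paramf paramf_alt
  rw [loopA]
  cases isparallel with
  | true =>
      rw [List.cons_append, chain_par]
      simp [sum_map_mul]
  | false =>
      rw [List.cons_append, chain_seq, ← List.cons_append, butlastsum_append_last]
      cases nnarc with
      | nil => simp [pairsum]
      | cons w ws =>
          simp only [List.map_cons, List.cons_append, pairsum]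
          rw [pairsum_map_last]
          have hk : (ws.length : Int) + 1 ≠ 0 := by positivity
          simp [sum_map_mul]
          rw [if_neg hk]
          ring
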